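-- pv_equiv track=rewrite | github.com/lsi3131/coding_test | swea/string/test_palindrom_1215.py | solution
-- ===== SOURCE A (Python) =====
-- def solution(mat, str_len):
--     if str_len == 0:
--         return 0
--     palindromes = []
--     for row in range(len(mat)):
--         for i in range(0, len(mat[0]) - str_len + 1):
--             s = mat[row][i:i + str_len]
--             if s == s[::-1]:
--                 palindromes.append(s)
--
--     for col in range(len(mat[0])):
--         for i in range(0, len(mat) - str_len + 1):
--             s = []
--             for j in range(str_len):
--                 s.append(mat[i + j][col])
--             if s == s[::-1]:
--                 palindromes.append(s)
--
--     return len(palindromes)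
-- ===== SOURCE B (Python) =====
-- def solution(mat, str_len):
--     if str_len <= 0:
--         return 0
--
--     half = str_len // 2
--     parity = str_len % 2
--
--     def count_line(s):
--         # expand around each center; a length-str_len window is a palindrome
--         # iff all `half` mirror pairs around its center match
--         n = len(s)
--         total = 0
--         for c in range(half, n - half + 1 - parity):
--             r = 0
--             while r < half and s[c - 1 - r] == s[c + parity + r]:
--                 r += 1
--             if r == half:
--                 total += 1
--         return total
--
--     lines = list(mat) + [''.join(col) for col in zip(*mat)]
--     return sum(count_line(s) for s in lines)
-- ===== Notes on version B (the rewrite author's own statement) =====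
-- stated objective: alternative
-- what changed: B replaces A's slide-a-window-and-compare-with-its-reversal scan (three index loop nests appending each palindromic slice to a list) with an expand-around-center algorithm: for each window center in each row and each zip(*mat) column it expands mirror pairs outward and counts the center if all half-length pairs match, building no slices and no list.
-- intended difference: For negative str_len on a non-empty matrix no window of that length exists, yet A counts the empty and negatively-wrapped slices its loops enumerate (every column gather runs over range(str_len) = empty) and returns a positive count; B returns 0, the intended count when no length-str_len window exists. — e.g. on solution(["ab", "ba"], -1): A returns 16, B returns 0
-- outside the precondition, e.g. on solution(['a', 'bc'], 1): A returns 4, B returns 5; on solution(['', 'a'], -1): A returns 4, B returns 0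
import Mathlib
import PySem

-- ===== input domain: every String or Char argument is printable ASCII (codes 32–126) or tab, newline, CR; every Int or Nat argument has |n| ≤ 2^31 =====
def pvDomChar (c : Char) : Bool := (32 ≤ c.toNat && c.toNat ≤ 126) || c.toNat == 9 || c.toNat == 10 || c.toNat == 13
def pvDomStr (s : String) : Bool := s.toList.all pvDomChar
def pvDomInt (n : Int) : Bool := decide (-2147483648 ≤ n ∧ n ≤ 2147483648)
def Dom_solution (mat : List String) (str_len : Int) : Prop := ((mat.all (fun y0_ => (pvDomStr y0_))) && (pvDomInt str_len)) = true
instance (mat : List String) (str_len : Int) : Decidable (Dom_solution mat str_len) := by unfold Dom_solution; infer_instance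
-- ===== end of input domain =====

-- B counts length-str_len palindromic windows by expanding mirror pairs around each window
-- CENTER (no slices, no reversal), applied to the rows and the zip(*mat) columns;
-- objective: alternative (different algorithm, same asymptotic cost).

-- ===== PORT A =====
-- helper naming A's row-pass window  mat[row][i:i+str_len]
def pvRowWin (mat : List String) (str_len row i : Int) : List Char :=
  PySem.List.slice ((PySem.List.pyGetD mat row "").toList) (some i) (some (i + str_len))

-- helper naming A's column-pass gathered window  [mat[i+j][col] for j in range(str_len)]
def pvColWin (mat : List String) (str_len col i : Int) : List Char :=
  (PySem.List.pyRange 0 str_len 1).foldl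
    (fun s j => s ++ [PySem.List.pyGetD ((PySem.List.pyGetD mat (i + j) "").toList) col ' ']) []

def solution (mat : List String) (str_len : Int) : Int :=
  if str_len = 0 then 0
  else
    let pal1 : List (List Char) :=
      (PySem.List.pyRange 0 (mat.length : Int) 1).foldl (fun acc row =>
        (PySem.List.pyRange 0 (((mat.headD "").toList.length : Int) - str_len + 1) 1).foldl
          (fun acc i =>
            if pvRowWin mat str_len row i = (pvRowWin mat str_len row i).reverse
            then acc ++ [pvRowWin mat str_len row i] else acc) acc) []
    let pal2 : List (List Char) :=
      (PySem.List.pyRange 0 ((mat.headD "").toList.length : Int) 1).foldl (fun acc col =>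
        (PySem.List.pyRange 0 ((mat.length : Int) - str_len + 1) 1).foldl
          (fun acc i =>
            if pvColWin mat str_len col i = (pvColWin mat str_len col i).reverse
            then acc ++ [pvColWin mat str_len col i] else acc) acc) pal1
    (pal2.length : Int)

-- ===== PORT B =====
-- the while loop 'while r < half and s[c-1-r] == s[c+parity+r]: r += 1', ported with fuel:
-- the guard r < half bounds the iteration count, so fuel = half.toNat is exact.
def pvExpand (s : List Char) (c parity half : Int) : Nat → Int → Int
  | 0, r => r
  | f + 1, r =>
      if r < half ∧ PySem.List.pyGetD s (c - 1 - r) ' ' = PySem.List.pyGetD s (c + parity + r) ' '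
      then pvExpand s c parity half f (r + 1)
      else r

-- count_line(s): for each center c, expand; count it if all `half` mirror pairs matched
def pvCountLine (half parity : Int) (s : List Char) : Int :=
  (PySem.List.pyRange half ((s.length : Int) - half + 1 - parity) 1).foldl
    (fun t c => if pvExpand s c parity half half.toNat 0 = half then t + 1 else t) 0

-- zip(*mat): heads of all rows, then recurse on the tails; stops at the shortest row.
-- Fuel = length of the first row (an upper bound on the shortest, so the guard stops first).
def pvZipT : Nat → List (List Char) → List (List Char)
  | 0, _ => []
  | _, [] => []
  | n + 1, ls =>
      if ls.any (fun l => l.isEmpty) then []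
      else ls.map (fun l => l.headD ' ') :: pvZipT n (ls.map (fun l => l.tail))

def solution_alt (mat : List String) (str_len : Int) : Int :=
  if str_len ≤ 0 then 0
  else
    let half := PySem.Int.floordiv str_len 2
    let parity := PySem.Int.mod str_len 2
    let rows := mat.map String.toList
    let cols := match rows with
      | [] => []
      | r :: _ => pvZipT r.length rows
    (rows ++ cols).foldl (fun t s => t + pvCountLine half parity s) 0

-- ===== PRECONDITION & SPEC =====
-- Pre_ excludes the empty matrix with str_len ≠ 0 (A raises IndexError on len(mat[0])) and
-- non-rectangular matrices, on which A's column pass either raises IndexError or A's loops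
-- read windows whose number and extent are an artefact of measuring every row by the first
-- row's width (the last disjunct keeps the ragged inputs where str_len exceeds every row
-- and the row count, on which A is total and both programs count nothing).
def Pre_solution (mat : List String) (str_len : Int) : Prop :=
  str_len = 0 ∨ (mat ≠ [] ∧
    ((∀ r ∈ mat, r.toList.length = (mat.headD "").toList.length) ∨
     ((mat.length : Int) < str_len ∧ ∀ r ∈ mat, (r.toList.length : Int) < str_len)))
instance (mat : List String) (str_len : Int) : Decidable (Pre_solution mat str_len) := by
  unfold Pre_solution; infer_instance

def pvWitness_solution : List String × Int := (["ab", "ba"], 1)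

-- For negative str_len on a non-empty matrix no window of that length exists, yet A counts
-- the empty and negatively-wrapped slices its loops enumerate (every column gather is over
-- range(str_len) = empty) and returns a positive count; B returns 0, the intended count of
-- length-str_len palindromes when no such window exists.
def D_solution (mat : List String) (str_len : Int) : Prop :=
  str_len < 0 ∧ mat ≠ []
instance (mat : List String) (str_len : Int) : Decidable (D_solution mat str_len) := by
  unfold D_solution; infer_instance

def Spec_solution (mat : List String) (str_len : Int) (out : Int) : Prop :=
  ¬ D_solution mat str_len → out = solution_alt mat str_len
instance (mat : List String) (str_len : Int) (out : Int) : Decidable (Spec_solution mat str_len out) := by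
  unfold Spec_solution; infer_instance

def pvDiffWitness_solution : List String × Int := (["ab", "ba"], -1)
def pvDiffWitnessOut_solution : Int × Int := (16, 0)

-- ===== CLAIM =====
def Claim_unchanged_solution : Prop := ∀ (mat : List String) (str_len : Int), Dom_solution mat str_len → Pre_solution mat str_len → Spec_solution mat str_len (solution mat str_len)
def Claim_changed_solution : Prop := Dom_solution (pvDiffWitness_solution.1) (pvDiffWitness_solution.2) ∧ Pre_solution (pvDiffWitness_solution.1) (pvDiffWitness_solution.2) ∧ D_solution (pvDiffWitness_solution.1) (pvDiffWitness_solution.2) ∧ solution (pvDiffWitness_solution.1) (pvDiffWitness_solution.2) = pvDiffWitnessOut_solution.1 ∧ solution_alt (pvDiffWitness_solution.1) (pvDiffWitness_solution.2) = pvDiffWitnessOut_solution.2 ∧ pvDiffWitnessOut_solution.1 ≠ pvDiffWitnessOut_solution.2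
def Claim_exact_solution : Prop := ∀ (mat : List String) (str_len : Int), Dom_solution mat str_len → Pre_solution mat str_len → D_solution mat str_len → solution mat str_len ≠ solution_alt mat str_len

-- ===== LEMMAS AND PROOFS =====
lemma pal_iff_half (s : List Char) :
    s = s.reverse ↔ ∀ k, k < s.length / 2 → s.getD k ' ' = s.getD (s.length - 1 - k) ' ' := by
  have key : ∀ j, j < s.length → s[j]? = some (s.getD j ' ') := by
    intro j hj
    rw [List.getElem?_eq_getElem hj, List.getD_eq_getElem s ' ' hj]
  have rev : ∀ i, i < s.length → s.reverse[i]? = s[s.length - 1 - i]? := by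
    intro i hi
    rw [List.getElem?_reverse hi]
  constructor
  · intro h k hk
    have h1 : k < s.length := by omega
    have h2 : s.length - 1 - k < s.length := by omega
    have : s[k]? = s[s.length - 1 - k]? := by
      conv_lhs => rw [h]
      exact rev k h1
    rw [key k h1, key _ h2] at this
    exact Option.some.inj this
  · intro h
    apply List.ext_getElem?
    intro i
    by_cases hi : i < s.length
    · rw [rev i hi]
      by_cases hlo : i < s.length / 2
      · have h2 : s.length - 1 - i < s.length := by omega
        rw [key i hi, key _ h2, h i hlo]
      · by_cases hhi : s.length - 1 - i < s.length / 2
        · have h2 : s.length - 1 - i < s.length := by omega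
          rw [key i hi, key _ h2]
          have := h _ hhi
          have he : s.length - 1 - (s.length - 1 - i) = i := by omega
          rw [he] at this
          exact congrArg some this.symm
        · have : i = s.length - 1 - i := by omega
          rw [← this]
    · have h2 : ¬ i < s.reverse.length := by simpa using hi
      rw [List.getElem?_eq_none (by omega), List.getElem?_eq_none (by simp; omega)]

lemma map_comp_pyGetD {α β : Type} (xs : List α) (d : α) (g : α → β) :
    (PySem.List.pyRange 0 (xs.length : Int) 1).map (fun j => g (PySem.List.pyGetD xs j d)) = xs.map g := by
  rw [show (fun j => g (PySem.List.pyGetD xs j d)) = g ∘ (fun j => PySem.List.pyGetD xs j d) from rfl,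
     ← List.map_map, PySem.List.map_pyGetD_pyRange_zero']

lemma map_pyRange_nat {β : Type} (W : Nat) (H : Int → β) :
    (PySem.List.pyRange 0 (W : Int) 1).map H = (List.range W).map (fun (c : Nat) => H (c : Int)) := by
  rw [PySem.List.pyRange_zero_natCast, List.map_map]
  simp only [Function.comp_def]

lemma A_closed (mat : List String) (L : Int) (hL : ¬ L = 0) :
    solution mat L =
      (((mat.map (fun s =>
          (PySem.List.pyRange 0 (((mat.headD "").toList.length : Int) - L + 1) 1).countP
            (fun i => decide (PySem.List.slice s.toList (some i) (some (i+L)) =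
              (PySem.List.slice s.toList (some i) (some (i+L))).reverse)))).sum
       + ((List.range (mat.headD "").toList.length).map (fun (c : Nat) =>
          (PySem.List.pyRange 0 ((mat.length : Int) - L + 1) 1).countP
            (fun i => decide (pvColWin mat L (c:Int) i = (pvColWin mat L (c:Int) i).reverse)))).sum
       : Nat) : Int) := by
  simp only [solution, if_neg hL]
  have e1 : (PySem.List.pyRange 0 (mat.length : Int) 1).foldl (fun acc row =>
        (PySem.List.pyRange 0 (((mat.headD "").toList.length : Int) - L + 1) 1).foldl
          (fun acc i =>
            if pvRowWin mat L row i = (pvRowWin mat L row i).reverse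
            then acc ++ [pvRowWin mat L row i] else acc) acc) [] =
      [] ++ (PySem.List.pyRange 0 (mat.length : Int) 1).flatMap (fun row =>
        ((PySem.List.pyRange 0 (((mat.headD "").toList.length : Int) - L + 1) 1).filter
          (fun i => decide (pvRowWin mat L row i = (pvRowWin mat L row i).reverse))).map
            (fun i => pvRowWin mat L row i)) := by
    rw [← PySem.List.foldl_append_eq_flatMap]
    exact PySem.List.foldl_congr_mem' _ _ _ _
      (fun row _ acc => PySem.List.foldl_append_ite _ _ _ _)
  have e2 : ∀ init : List (List Char),
      (PySem.List.pyRange 0 ((mat.headD "").toList.length : Int) 1).foldl (fun acc col =>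
        (PySem.List.pyRange 0 ((mat.length : Int) - L + 1) 1).foldl
          (fun acc i =>
            if pvColWin mat L col i = (pvColWin mat L col i).reverse
            then acc ++ [pvColWin mat L col i] else acc) acc) init =
      init ++ (PySem.List.pyRange 0 ((mat.headD "").toList.length : Int) 1).flatMap (fun col =>
        ((PySem.List.pyRange 0 ((mat.length : Int) - L + 1) 1).filter
          (fun i => decide (pvColWin mat L col i = (pvColWin mat L col i).reverse))).map
            (fun i => pvColWin mat L col i)) := by
    intro init
    rw [← PySem.List.foldl_append_eq_flatMap]
    exact PySem.List.foldl_congr_mem' _ _ _ _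
      (fun col _ acc => PySem.List.foldl_append_ite _ _ _ _)
  rw [e1, e2]
  simp only [List.nil_append, List.length_append, List.length_flatMap, List.length_map, ← List.countP_eq_length_filter]
  congr 1
  congr 1
  · have := map_comp_pyGetD mat "" (fun s =>
      (PySem.List.pyRange 0 (((mat.headD "").toList.length : Int) - L + 1) 1).countP
        (fun i => decide (PySem.List.slice s.toList (some i) (some (i+L)) =
          (PySem.List.slice s.toList (some i) (some (i+L))).reverse)))
    simp only [pvRowWin]
    exact congrArg List.sum this
  · have := map_pyRange_nat (mat.headD "").toList.length (fun col =>
      (PySem.List.pyRange 0 ((mat.length : Int) - L + 1) 1).countP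
        (fun i => decide (pvColWin mat L col i = (pvColWin mat L col i).reverse)))
    exact congrArg List.sum this

def pvCol (rows : List (List Char)) (c : Nat) : List Char := rows.map (fun r => r.getD c ' ')

lemma zipT_eq (W : Nat) (rows : List (List Char)) (hne : rows ≠ [])
    (hrect : ∀ r ∈ rows, r.length = W) :
    pvZipT W rows = (List.range W).map (fun c => pvCol rows c) := by
  induction W generalizing rows with
  | zero => simp [pvZipT]
  | succ w ih =>
    obtain ⟨r0, rt, rfl⟩ : ∃ r0 rt, rows = r0 :: rt := by
      cases rows with
      | nil => exact absurd rfl hne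
      | cons a t => exact ⟨a, t, rfl⟩
    have hno : ((r0 :: rt).any (fun l => l.isEmpty)) = false := by
      rw [List.any_eq_false]
      intro r hr
      have := hrect r hr
      simp [List.isEmpty_iff]
      intro h
      rw [h] at this
      simp at this
    rw [show pvZipT (w+1) (r0::rt) = (if ((r0::rt).any fun l => l.isEmpty) then []
        else (r0::rt).map (fun l => l.headD ' ') :: pvZipT w ((r0::rt).map (fun l => l.tail)))
      from rfl, hno]
    simp only [Bool.false_eq_true, if_false]
    have hne' : (r0 :: rt).map (fun l => l.tail) ≠ [] := by simp
    have hrect' : ∀ r ∈ (r0 :: rt).map (fun l => l.tail), r.length = w := by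
      intro r hr
      rw [List.mem_map] at hr
      obtain ⟨x, hx, rfl⟩ := hr
      have := hrect x hx
      simp [this]
    rw [ih _ hne' hrect', List.range_succ_eq_map, List.map_cons]
    congr 1
    · unfold pvCol
      simp only [List.map_cons]
      congr 1
      · cases r0 <;> rfl
      · apply List.map_congr_left
        intro r _
        cases r <;> rfl
    · rw [List.map_map]
      apply List.map_congr_left
      intro c _
      unfold pvCol
      rw [List.map_map]
      apply List.map_congr_left
      intro r _
      simp only [Function.comp_def, Nat.succ_eq_add_one]
      cases r <;> rfl

lemma colwin_eq (mat : List String) (L i : Int) (c : Nat) (hL : 0 ≤ L) (h0 : 0 ≤ i)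
    (h1 : i + L ≤ (mat.length : Int)) :
    pvColWin mat L (c:Int) i =
      PySem.List.slice (pvCol (mat.map String.toList) c) (some i) (some (i + L)) := by
  obtain ⟨a, rfl⟩ : ∃ a : Nat, i = (a:Int) := ⟨i.toNat, (Int.toNat_of_nonneg h0).symm⟩
  obtain ⟨n, rfl⟩ : ∃ n : Nat, L = (n:Int) := ⟨L.toNat, (Int.toNat_of_nonneg hL).symm⟩
  have hKn : a + n ≤ mat.length := by exact_mod_cast h1
  unfold pvColWin
  rw [PySem.List.foldl_append_singleton_eq_map, List.nil_append,
      PySem.List.slice_natCast_add, PySem.List.pyRange_zero_natCast, List.map_map]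
  unfold pvCol
  rw [← List.map_drop, ← List.map_take]
  apply List.ext_getElem
  · simp
    omega
  · intro k h1k h2k
    simp only [List.length_map, List.length_take, List.length_drop, List.length_range,
      Function.comp_def] at h1k h2k ⊢
    have hk : k < n := by omega
    have hak : a + k < mat.length := by omega
    rw [List.getElem_map, List.getElem_map, List.getElem_range, List.getElem_take,
        List.getElem_drop, List.getElem_map]
    have e1 : (a:Int) + (k:Int) = ((a+k : Nat) : Int) := by push_cast; ring
    rw [e1, PySem.List.pyGetD_natCast, PySem.List.pyGetD_natCast,
        List.getD_eq_getElem mat "" hak]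

-- pvExpand reaches half iff every remaining mirror pair matches
lemma pvExpand_eq_iff (s : List Char) (c parity : Int) (h : Nat) :
    ∀ (f r : Nat), h ≤ f + r → r ≤ h →
    (pvExpand s c parity (h : Int) f (r : Int) = (h : Int) ↔
      ∀ j : Nat, r ≤ j → j < h →
        PySem.List.pyGetD s (c - 1 - (j:Int)) ' ' = PySem.List.pyGetD s (c + parity + (j:Int)) ' ') := by
  intro f
  induction f with
  | zero =>
    intro r hf hr
    have : r = h := by omega
    subst this
    simp only [pvExpand]
    constructor
    · intro _ j hj1 hj2
      omega
    · intro _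
      simp
  | succ f ih =>
    intro r hf hr
    by_cases hrh : r = h
    · simp only [pvExpand]
      rw [if_neg (by
        intro hcon
        have hlt : (r:Int) < (h:Int) := hcon.1
        omega)]
      constructor
      · intro _ j hj1 hj2
        omega
      · intro _
        omega
    · have hrlt : r < h := by omega
      simp only [pvExpand]
      by_cases hpair : PySem.List.pyGetD s (c - 1 - (r:Int)) ' ' = PySem.List.pyGetD s (c + parity + (r:Int)) ' '
      · rw [if_pos ⟨by exact_mod_cast hrlt, hpair⟩]
        have hcast : ((r:Int) + 1) = (((r+1 : Nat)):Int) := by push_cast; ring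
        rw [hcast, ih (r+1) (by omega) (by omega)]
        constructor
        · intro hall j hj1 hj2
          by_cases hjr : j = r
          · subst hjr; exact hpair
          · exact hall j (by omega) hj2
        · intro hall j hj1 hj2
          exact hall j (by omega) hj2
      · rw [if_neg (by intro hcon; exact hpair hcon.2)]
        constructor
        · intro hcon
          exfalso
          have : r = h := by exact_mod_cast hcon
          omega
        · intro hall
          exact absurd (hall r (le_refl r) hrlt) hpair

-- a Python slice starting at len(xs) is empty whatever the stop is
lemma slice_at_len {α : Type} (xs : List α) (b : Int) :
    PySem.List.slice xs (some (xs.length : Int)) (some b) = [] := by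
  apply List.eq_nil_of_length_eq_zero
  rw [PySem.List.length_slice]
  have h1 : PySem.List.clampIdx xs.length b ≤ xs.length := PySem.List.clampIdx_le xs.length b
  have h2 : PySem.List.clampIdx xs.length (xs.length : Int) = xs.length := by
    rw [PySem.List.clampIdx_natCast]
    omega
  omega

-- the central lemma: B's per-center expansion count over one line equals A's
-- per-start reversed-slice count over the same line.
lemma line_eq (s : List Char) (Ln : Nat) (hL : 1 ≤ Ln) :
    pvCountLine ((Ln / 2 : Nat) : Int) ((Ln % 2 : Nat) : Int) s =
      ((PySem.List.pyRange 0 ((s.length : Int) - (Ln:Int) + 1) 1).countP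
        (fun i => decide (PySem.List.slice s (some i) (some (i + (Ln:Int))) =
          (PySem.List.slice s (some i) (some (i + (Ln:Int)))).reverse)) : Int) := by
  have hsplit : Ln = 2 * (Ln / 2) + Ln % 2 := by omega
  set h := Ln / 2 with hh
  set p := Ln % 2 with hp
  have hp1 : p ≤ 1 := by omega
  unfold pvCountLine
  rw [show (fun (t : Int) c => if pvExpand s c ((p:Nat):Int) ((h:Nat):Int) (((h:Nat):Int)).toNat 0 = ((h:Nat):Int) then t + 1 else t)
      = (fun (t : Int) c => if (decide (pvExpand s c ((p:Nat):Int) ((h:Nat):Int) (((h:Nat):Int)).toNat 0 = ((h:Nat):Int))) = true then t + 1 else t) from by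
    funext t c
    simp]
  rw [PySem.List.foldl_if_add_one, zero_add]
  congr 1
  -- both ranges have the same number m of elements, shifted by h
  rw [PySem.List.pyRange_one (h:Int) _, PySem.List.pyRange_one 0 _, List.countP_map, List.countP_map]
  have hlen : ((s.length : Int) - (h:Int) + 1 - (p:Int) - (h:Int)).toNat
      = ((s.length : Int) - (Ln:Int) + 1 - 0).toNat := by omega
  rw [hlen]
  apply List.countP_congr
  intro k hk
  rw [List.mem_range] at hk
  have hkL : k + Ln ≤ s.length := by omega
  simp only [Function.comp_def, zero_add]
  -- the window
  have hwin : PySem.List.slice s (some (k:Int)) (some ((k:Int) + (Ln:Int))) = (s.drop k).take Ln :=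
    PySem.List.slice_natCast_add s k Ln
  have hwlen : ((s.drop k).take Ln).length = Ln := by
    simp
    omega
  have hget : ∀ q, q < Ln → ((s.drop k).take Ln).getD q ' ' = s.getD (k + q) ' ' := by
    intro q hq
    have h1 : q < ((s.drop k).take Ln).length := by omega
    have h2 : k + q < s.length := by omega
    rw [List.getD_eq_getElem _ ' ' h1, List.getD_eq_getElem s ' ' h2,
        List.getElem_take, List.getElem_drop]
  have hpy : ∀ a : Nat, a < s.length → PySem.List.pyGetD s (a:Int) ' ' = s.getD a ' ' := by
    intro a _
    exact PySem.List.pyGetD_natCast s a ' '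
  -- expansion side indices are in range
  have hEq : (pvExpand s ((h:Int) + (k:Int)) (p:Int) (h:Int) ((h:Int)).toNat 0 = (h:Int)) ↔
      ∀ j : Nat, j < h → s.getD (k + (h - 1 - j)) ' ' = s.getD (k + h + p + j) ' ' := by
    have hiff := pvExpand_eq_iff s ((h:Int) + (k:Int)) (p:Int) h h 0 (by omega) (by omega)
    simp only [Nat.cast_zero] at hiff
    rw [Int.toNat_natCast, hiff]
    constructor
    · intro hall j hj
      have := hall j (by omega) hj
      have e1 : (h:Int) + (k:Int) - 1 - (j:Int) = ((k + (h - 1 - j) : Nat) : Int) := by push_cast; omega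
      have e2 : (h:Int) + (k:Int) + (p:Int) + (j:Int) = ((k + h + p + j : Nat) : Int) := by push_cast; omega
      rw [e1, e2, hpy _ (by omega), hpy _ (by omega)] at this
      exact this
    · intro hall j _ hj
      have := hall j hj
      have e1 : (h:Int) + (k:Int) - 1 - (j:Int) = ((k + (h - 1 - j) : Nat) : Int) := by push_cast; omega
      have e2 : (h:Int) + (k:Int) + (p:Int) + (j:Int) = ((k + h + p + j : Nat) : Int) := by push_cast; omega
      rw [e1, e2, hpy _ (by omega), hpy _ (by omega)]
      exact this
  have hPal : ((s.drop k).take Ln = ((s.drop k).take Ln).reverse) ↔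
      ∀ j : Nat, j < h → s.getD (k + (h - 1 - j)) ' ' = s.getD (k + h + p + j) ' ' := by
    rw [pal_iff_half]
    rw [hwlen]
    have hhalf : Ln / 2 = h := hh.symm
    rw [hhalf]
    constructor
    · intro hall j hj
      have := hall (h - 1 - j) (by omega)
      rw [hget _ (by omega), hget _ (by omega)] at this
      have e : Ln - 1 - (h - 1 - j) = h + p + j := by omega
      rw [e] at this
      rw [show k + h + p + j = k + (h + p + j) by omega]
      exact this
    · intro hall q hq
      have := hall (h - 1 - q) (by omega)
      have e1 : h - 1 - (h - 1 - q) = q := by omega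
      rw [e1] at this
      rw [hget _ (by omega), hget _ (by omega)]
      have e2 : Ln - 1 - q = h + p + (h - 1 - q) := by omega
      rw [e2, show k + (h + p + (h - 1 - q)) = k + h + p + (h - 1 - q) by omega]
      exact this
  rw [hwin]
  by_cases hcase : ∀ j : Nat, j < h → s.getD (k + (h - 1 - j)) ' ' = s.getD (k + h + p + j) ' '
  · rw [decide_eq_true (hEq.mpr hcase), decide_eq_true (hPal.mpr hcase)]
  · rw [decide_eq_false (fun hc => hcase (hEq.mp hc)),
        decide_eq_false (fun hc => hcase (hPal.mp hc))]

lemma zipT_len (n : Nat) (ls : List (List Char)) :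
    ∀ c ∈ pvZipT n ls, c.length = ls.length := by
  induction n generalizing ls with
  | zero => intro c hc; simp [pvZipT] at hc
  | succ m ih =>
    intro c hc
    cases ls with
    | nil => simp [pvZipT] at hc
    | cons l lt =>
      rw [show pvZipT (m+1) (l::lt) = (if ((l::lt).any fun x => x.isEmpty) then []
          else (l::lt).map (fun x => x.headD ' ') :: pvZipT m ((l::lt).map (fun x => x.tail)))
        from rfl] at hc
      by_cases hany : ((l::lt).any fun x => x.isEmpty) = true
      · rw [if_pos hany] at hc
        simp at hc
      · rw [if_neg hany] at hc
        rcases List.mem_cons.mp hc with rfl | hmem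
        · simp
        · have := ih ((l::lt).map (fun x => x.tail)) c hmem
          simpa using this

lemma B_closed (mat : List String) (Ln : Nat) (hL : 1 ≤ Ln) (m0 : String) (mt : List String)
    (hma : mat = m0 :: mt) :
    solution_alt mat (Ln:Int) =
      ((mat.map String.toList).map
          (fun r => pvCountLine ((Ln / 2 : Nat) : Int) ((Ln % 2 : Nat) : Int) r)).sum
      + ((pvZipT m0.toList.length (mat.map String.toList)).map
          (fun c => pvCountLine ((Ln / 2 : Nat) : Int) ((Ln % 2 : Nat) : Int) c)).sum := by
  subst hma
  have hne : ¬ ((Ln:Int) ≤ 0) := by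
    push Not
    exact_mod_cast hL
  simp only [solution_alt, if_neg hne]
  have hfd : PySem.Int.floordiv (Ln:Int) 2 = ((Ln / 2 : Nat) : Int) := by
    exact_mod_cast PySem.Int.floordiv_natCast Ln 2
  have hmod : PySem.Int.mod (Ln:Int) 2 = ((Ln % 2 : Nat) : Int) := by
    exact_mod_cast PySem.Int.mod_natCast Ln 2
  rw [hfd, hmod]
  simp only [List.map_cons]
  rw [PySem.List.foldl_add, zero_add, List.map_append, List.sum_append]
  simp only [List.map_cons]

lemma main_eq (mat : List String) (Ln : Nat) (hL : 1 ≤ Ln) (hne : mat ≠ [])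
    (hrect : ∀ r ∈ mat, r.toList.length = (mat.headD "").toList.length) :
    solution mat (Ln:Int) = solution_alt mat (Ln:Int) := by
  obtain ⟨m0, mt, rfl⟩ : ∃ m0 mt, mat = m0 :: mt := by
    cases mat with
    | nil => exact absurd rfl hne
    | cons a t => exact ⟨a, t, rfl⟩
  have hL0 : ¬ ((Ln:Int) = 0) := by
    intro hc
    have : Ln = 0 := by exact_mod_cast hc
    omega
  rw [A_closed _ _ hL0, B_closed _ Ln hL m0 mt rfl]
  have hW : ∀ r ∈ (m0 :: mt), r.toList.length = ((m0 :: mt).headD "").toList.length := hrect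
  have hz := zipT_eq m0.toList.length ((m0 :: mt).map String.toList)
    (by simp) (by
      intro r hr
      rw [List.mem_map] at hr
      obtain ⟨x, hx, rfl⟩ := hr
      have := hrect x hx
      simpa using this)
  rw [hz]
  rw [Nat.cast_add, Nat.cast_list_sum, Nat.cast_list_sum, List.map_map, List.map_map]
  congr 1
  · -- rows
    rw [List.map_map]
    apply congrArg List.sum
    apply List.map_congr_left
    intro r hr
    have hlen := hrect r hr
    simp only [Function.comp_def]
    rw [line_eq r.toList Ln hL, hlen]
  · -- columns
    rw [List.map_map]
    simp only [List.headD_cons]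
    apply congrArg List.sum
    apply List.map_congr_left
    intro c _
    have hlenc : (pvCol ((m0 :: mt).map String.toList) c).length = (m0 :: mt).length := by
      simp [pvCol]
    simp only [Function.comp_def]
    rw [line_eq (pvCol ((m0 :: mt).map String.toList) c) Ln hL, hlenc]
    apply congrArg
    apply List.countP_congr
    intro i hi
    rw [PySem.List.mem_pyRange_one] at hi
    rw [colwin_eq (m0 :: mt) (Ln:Int) i c (by positivity) hi.1 (by omega)]

lemma count_line_zero (s : List Char) (Ln : Nat) (hn : s.length < Ln) :
    pvCountLine ((Ln / 2 : Nat) : Int) ((Ln % 2 : Nat) : Int) s = 0 := by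
  unfold pvCountLine
  rw [PySem.List.pyRange_one_eq_nil (by omega)]
  rfl

lemma zero_eq (mat : List String) (L : Int) (hne : mat ≠ [])
    (hbig : (mat.length : Int) < L) (hrows : ∀ r ∈ mat, (r.toList.length : Int) < L) :
    solution mat L = 0 ∧ solution_alt mat L = 0 := by
  have hL : L ≠ 0 := by
    have : (0:Int) ≤ (mat.length : Int) := by positivity
    omega
  obtain ⟨Ln, rfl⟩ : ∃ n : Nat, L = (n:Int) := ⟨L.toNat, by omega⟩
  have hL1 : 1 ≤ Ln := by
    by_contra hc
    exact hL (by omega)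
  obtain ⟨m0, mt, rfl⟩ : ∃ m0 mt, mat = m0 :: mt := by
    cases mat with
    | nil => exact absurd rfl hne
    | cons a t => exact ⟨a, t, rfl⟩
  constructor
  · rw [A_closed _ _ (by exact_mod_cast hL)]
    have hrow0 : (((m0 :: mt).headD "").toList.length : Int) - (Ln:Int) + 1 ≤ 0 := by
      have := hrows ((m0 :: mt).headD "") (by simp)
      omega
    have hcol0 : (((m0 :: mt).length : Int)) - (Ln:Int) + 1 ≤ 0 := by omega
    have s1 : ((m0 :: mt).map (fun s =>
        (PySem.List.pyRange 0 ((((m0 :: mt).headD "").toList.length : Int) - (Ln:Int) + 1) 1).countP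
          (fun i => decide (PySem.List.slice s.toList (some i) (some (i+(Ln:Int))) =
            (PySem.List.slice s.toList (some i) (some (i+(Ln:Int)))).reverse)))).sum = 0 := by
      apply List.sum_eq_zero
      intro x hx
      rw [List.mem_map] at hx
      obtain ⟨a, _, rfl⟩ := hx
      rw [PySem.List.pyRange_one_eq_nil hrow0]
      rfl
    have s2 : ((List.range ((m0 :: mt).headD "").toList.length).map (fun (c : Nat) =>
        (PySem.List.pyRange 0 (((m0 :: mt).length : Int) - (Ln:Int) + 1) 1).countP
          (fun i => decide (pvColWin (m0 :: mt) (Ln:Int) (c:Int) i = (pvColWin (m0 :: mt) (Ln:Int) (c:Int) i).reverse)))).sum = 0 := by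
      apply List.sum_eq_zero
      intro x hx
      rw [List.mem_map] at hx
      obtain ⟨a, _, rfl⟩ := hx
      rw [PySem.List.pyRange_one_eq_nil hcol0]
      rfl
    rw [s1, s2]
    rfl
  · rw [B_closed _ Ln hL1 m0 mt rfl]
    have t1 : (((m0 :: mt).map String.toList).map
        (fun r => pvCountLine ((Ln / 2 : Nat) : Int) ((Ln % 2 : Nat) : Int) r)).sum = 0 := by
      apply List.sum_eq_zero
      intro x hx
      rw [List.mem_map] at hx
      obtain ⟨a, ha, rfl⟩ := hx
      rw [List.mem_map] at ha
      obtain ⟨y, hy, rfl⟩ := ha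
      apply count_line_zero
      have := hrows y hy
      omega
    have t2 : ((pvZipT m0.toList.length ((m0 :: mt).map String.toList)).map
        (fun c => pvCountLine ((Ln / 2 : Nat) : Int) ((Ln % 2 : Nat) : Int) c)).sum = 0 := by
      apply List.sum_eq_zero
      intro x hx
      rw [List.mem_map] at hx
      obtain ⟨a, ha, rfl⟩ := hx
      apply count_line_zero
      have := zipT_len m0.toList.length ((m0 :: mt).map String.toList) a ha
      rw [this]
      simp only [List.length_map]
      exact_mod_cast (by simpa using hbig : ((m0 :: mt).length : Int) < (Ln:Int))
    rw [t1, t2]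
    ring

-- inside D_ A counts at least the vacuous windows of the first row, so it is positive
lemma A_pos_of_neg (mat : List String) (L : Int) (hL : L < 0) (hne : mat ≠ []) :
    1 ≤ solution mat L := by
  obtain ⟨m0, mt, rfl⟩ : ∃ m0 mt, mat = m0 :: mt := by
    cases mat with
    | nil => exact absurd rfl hne
    | cons a t => exact ⟨a, t, rfl⟩
  rw [A_closed _ _ (by omega)]
  have hpos : 0 < ((m0 :: mt).map (fun s =>
      (PySem.List.pyRange 0 ((((m0 :: mt).headD "").toList.length : Int) - L + 1) 1).countP
        (fun i => decide (PySem.List.slice s.toList (some i) (some (i+L)) =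
          (PySem.List.slice s.toList (some i) (some (i+L))).reverse)))).sum := by
    rw [List.map_cons, List.sum_cons]
    have : 0 < (PySem.List.pyRange 0 ((((m0 :: mt).headD "").toList.length : Int) - L + 1) 1).countP
        (fun i => decide (PySem.List.slice m0.toList (some i) (some (i+L)) =
          (PySem.List.slice m0.toList (some i) (some (i+L))).reverse)) := by
      rw [List.countP_pos_iff]
      refine ⟨(m0.toList.length : Int), ?_, ?_⟩
      · rw [PySem.List.mem_pyRange_one]
        simp only [List.headD_cons]
        constructor
        · positivity
        · omega
      · rw [slice_at_len m0.toList _]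
        simp
    omega
  have : 0 < (((m0 :: mt).map (fun s =>
      (PySem.List.pyRange 0 ((((m0 :: mt).headD "").toList.length : Int) - L + 1) 1).countP
        (fun i => decide (PySem.List.slice s.toList (some i) (some (i+L)) =
          (PySem.List.slice s.toList (some i) (some (i+L))).reverse)))).sum
     + ((List.range ((m0 :: mt).headD "").toList.length).map (fun (c : Nat) =>
        (PySem.List.pyRange 0 (((m0 :: mt).length : Int) - L + 1) 1).countP
          (fun i => decide (pvColWin (m0 :: mt) L (c:Int) i = (pvColWin (m0 :: mt) L (c:Int) i).reverse)))).sum) := by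
    omega
  exact_mod_cast this

-- ===== VERDICT =====
theorem solution_spec : Claim_unchanged_solution := by
  intro mat L _ hpre hD
  unfold D_solution at hD
  push Not at hD
  rcases hpre with h0 | ⟨hne, hcase⟩
  · subst h0
    simp [solution, solution_alt]
  · have hnn : ¬ L < 0 := fun hneg => hne (hD hneg)
    by_cases h0 : L = 0
    · subst h0
      simp [solution, solution_alt]
    · have hpos : 1 ≤ L := by omega
      obtain ⟨Ln, rfl⟩ : ∃ n : Nat, L = (n:Int) := ⟨L.toNat, by omega⟩
      have hL1 : 1 ≤ Ln := by exact_mod_cast hpos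
      rcases hcase with hrect | ⟨hbig, hrows⟩
      · exact main_eq mat Ln hL1 hne hrect
      · exact ((zero_eq mat _ hne hbig hrows).1).trans ((zero_eq mat _ hne hbig hrows).2).symm

theorem solution_changed : Claim_changed_solution := by
  unfold Claim_changed_solution
  decide

theorem solution_tight : Claim_exact_solution := by
  intro mat L _ _ hD
  obtain ⟨hL, hne⟩ := hD
  have hB : solution_alt mat L = 0 := by
    simp [solution_alt, if_pos (le_of_lt hL)]
  have hA := A_pos_of_neg mat L hL hne
  omega
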